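-- pv_equiv track=rewrite | github.com/lokashrinav/lc | 2429 Minimize XOR/2429minimize-xor.py | minimizeXor
-- ===== SOURCE A (Python) =====
-- def minimizeXor(num1: int, num2: int) -> int:
--     # 0001
--     # 0001 = 0
--
--     '''
--
--     We take the min number of set bits
--
--     remove the top set bits from num1
--
--     '''
--
--     def countBits(x):
--         count = 0
--         while x:
--             count += (x & 1)
--             x = x >> 1
--         return count
--
--     count1, count2 = countBits(num1), countBits(num2)
--
--     x = num1
--
--     i = 0
--     while count1 > count2:
--         if x & (1 << i):
--             count1 -= 1
--             x = x ^ (1 << i)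
--         i += 1
--
--     while count2 > count1:
--         if x & (1 << i) == 0:
--             count2 -= 1
--             x = x | (1 << i)
--         i += 1
--
--     return x
-- ===== SOURCE B (Python) =====
-- def minimizeXor(num1: int, num2: int) -> int:
--     # Build the answer from 0: copy num1's highest set bits (as many as num2
--     # has set bits) scanning positions top-down, then fill lowest zeros.
--     def countBits(x):  # same helper as in A
--         count = 0
--         while x:
--             count += (x & 1)
--             x = x >> 1
--         return count
--
--     k = countBits(num2)
--     res = 0
--     for i in range(num1.bit_length() - 1, -1, -1):
--         if k and (num1 >> i) & 1:
--             res |= 1 << i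
--             k -= 1
--     i = 0
--     while k:
--         if (res >> i) & 1 == 0:
--             res |= 1 << i
--             k -= 1
--         i += 1
--     return res
-- ===== Notes on version B (the rewrite author's own statement) =====
-- stated objective: alternative
-- what changed: B constructs the result from 0 by scanning bit positions top-down and copying num1's highest set bits until num2's popcount is used up (then filling lowest zeros), instead of A's in-place tear-down of num1 that clears its lowest set bits by a bottom-up scan; B also counts only num2's bits where A counts both numbers.
import Mathlib
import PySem

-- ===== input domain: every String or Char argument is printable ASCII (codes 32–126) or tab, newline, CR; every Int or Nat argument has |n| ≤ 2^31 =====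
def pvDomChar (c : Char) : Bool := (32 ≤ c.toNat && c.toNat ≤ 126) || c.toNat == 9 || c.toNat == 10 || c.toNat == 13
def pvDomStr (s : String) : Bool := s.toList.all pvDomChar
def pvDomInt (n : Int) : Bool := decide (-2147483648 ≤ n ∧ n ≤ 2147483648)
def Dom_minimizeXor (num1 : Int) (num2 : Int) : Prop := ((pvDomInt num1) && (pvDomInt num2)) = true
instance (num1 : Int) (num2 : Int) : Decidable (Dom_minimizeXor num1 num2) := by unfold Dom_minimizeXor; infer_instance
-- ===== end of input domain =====

-- B builds the result from 0 by copying num1's highest set bits top-down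
-- (num2's popcount many) and then filling lowest zeros, instead of A's
-- in-place bottom-up tear-down of num1; proved equal on nonnegative inputs
-- (A's countBits never terminates on negative ints, excluded by Pre_).

-- ===== PORT A =====
-- the while-loops take a fuel argument that only makes them total;
-- on every input admitted by Pre_ the fuel is provably sufficient.
def pvCountBitsA (fuel : Nat) (x : Int) (count : Int) : Int :=
  match fuel with
  | 0 => count
  | f+1 => if x ≠ 0 then pvCountBitsA f (x >>> (1:Nat)) (count + PySem.Int.band x 1) else count

-- first while loop; returns the final (count1, i, x)
def pvLoop1A (fuel : Nat) (count1 count2 : Int) (i : Nat) (x : Int) : Int × Nat × Int :=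
  match fuel with
  | 0 => (count1, i, x)
  | f+1 =>
    if count1 > count2 then
      if PySem.Int.band x ((1:Int) <<< i) ≠ 0 then
        pvLoop1A f (count1 - 1) count2 (i + 1) (PySem.Int.bxor x ((1:Int) <<< i))
      else pvLoop1A f count1 count2 (i + 1) x
    else (count1, i, x)

-- second while loop; returns the final x
def pvLoop2A (fuel : Nat) (count1 count2 : Int) (i : Nat) (x : Int) : Int :=
  match fuel with
  | 0 => x
  | f+1 =>
    if count2 > count1 then
      if PySem.Int.band x ((1:Int) <<< i) = 0 then
        pvLoop2A f count1 (count2 - 1) (i + 1) (PySem.Int.bor x ((1:Int) <<< i))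
      else pvLoop2A f count1 count2 (i + 1) x
    else x

def minimizeXor (num1 : Int) (num2 : Int) : Int :=
  let fuel := num1.natAbs + num2.natAbs + 200
  let count1 := pvCountBitsA fuel num1 0
  let count2 := pvCountBitsA fuel num2 0
  match pvLoop1A fuel count1 count2 0 num1 with
  | (count1', i, x) => pvLoop2A fuel count1' count2 i x

-- ===== PORT B =====
-- B's inner helper countBits is textually identical to A's helper in the
-- Python, so its transliteration pvCountBitsA is shared.
-- for i in range(num1.bit_length()-1, -1, -1): copy bit i while k is truthy;
-- the argument j is "one past" the position, so j = i+1 handles position i.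
def pvCopyB : Nat → Int → Int → Int → Int × Int
  | 0, k, _, res => (res, k)
  | j+1, k, num1, res =>
      if k ≠ 0 ∧ PySem.Int.band (num1 >>> j) 1 ≠ 0 then
        pvCopyB j (k - 1) num1 (PySem.Int.bor res ((1:Int) <<< j))
      else pvCopyB j k num1 res

-- while k: if (res >> i) & 1 == 0: res |= 1 << i; k -= 1; i += 1
def pvFillB (fuel : Nat) (k : Int) (i : Nat) (res : Int) : Int :=
  match fuel with
  | 0 => res
  | f+1 =>
    if k ≠ 0 then
      if PySem.Int.band (res >>> i) 1 = 0 then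
        pvFillB f (k - 1) (i + 1) (PySem.Int.bor res ((1:Int) <<< i))
      else pvFillB f k (i + 1) res
    else res

def minimizeXor_alt (num1 : Int) (num2 : Int) : Int :=
  let fuel := num1.natAbs + num2.natAbs + 200
  let k := pvCountBitsA fuel num2 0
  -- num1.bit_length() is Nat.size of |num1|
  match pvCopyB (Nat.size num1.natAbs) k num1 0 with
  | (res, k') => pvFillB fuel k' 0 res

-- ===== PRECONDITION & SPEC =====
-- Pre_ excludes negative inputs: A's countBits loops forever there (x >> 1
-- never reaches 0 for x < 0), so A returns on exactly the inputs in Pre_.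
def Pre_minimizeXor (num1 : Int) (num2 : Int) : Prop := 0 ≤ num1 ∧ 0 ≤ num2
instance (num1 : Int) (num2 : Int) : Decidable (Pre_minimizeXor num1 num2) := by unfold Pre_minimizeXor; infer_instance
def pvWitness_minimizeXor : Int × Int := (25, 72)

def Spec_minimizeXor (num1 : Int) (num2 : Int) (out : Int) : Prop := out = minimizeXor_alt num1 num2
instance (num1 : Int) (num2 : Int) (out : Int) : Decidable (Spec_minimizeXor num1 num2 out) := by unfold Spec_minimizeXor; infer_instance

-- ===== CLAIM (what is proved, stated in full; the proofs are below) =====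
def Claim_equal_minimizeXor : Prop := ∀ (num1 : Int) (num2 : Int), Dom_minimizeXor num1 num2 → Pre_minimizeXor num1 num2 → Spec_minimizeXor num1 num2 (minimizeXor num1 num2)

-- ===== LEMMAS AND PROOFS =====

-- Nat-level popcount (specification both ports are reduced to)
def pvPc (n : Nat) : Nat :=
  if h : n = 0 then 0 else n % 2 + pvPc (n / 2)
decreasing_by exact Nat.div_lt_self (Nat.pos_of_ne_zero h) (by omega)

-- Nat-level "clear the k lowest set bits" (the common normal form of
-- A's tear-down loop and B's kept-top-bits copy loop)
def pvStripN (k : Nat) (n : Nat) : Nat :=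
  match k with
  | 0 => n
  | k+1 => pvStripN k (n &&& (n - 1))

theorem pvPc_zero : pvPc 0 = 0 := by rw [pvPc]; simp

theorem pvPc_rec (n : Nat) (h : n ≠ 0) : pvPc n = n % 2 + pvPc (n / 2) := by
  rw [pvPc]; simp [h]

theorem pvPc_two_mul (m : Nat) : pvPc (2 * m) = pvPc m := by
  rcases Nat.eq_zero_or_pos m with h | h
  · simp [h, pvPc_zero]
  · rw [pvPc_rec (2 * m) (by omega)]
    simp [Nat.mul_mod_right, Nat.mul_div_cancel_left _ (by omega : 0 < 2)]

theorem pvPc_two_mul_add_one (m : Nat) : pvPc (2 * m + 1) = pvPc m + 1 := by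
  rw [pvPc_rec (2 * m + 1) (by omega)]
  have h1 : (2 * m + 1) % 2 = 1 := by omega
  have h2 : (2 * m + 1) / 2 = m := by omega
  rw [h1, h2]; omega

-- parity decompositions of &&& and ^^^
theorem pvLand10 (m n : Nat) : (2*m+1) &&& (2*n) = 2*(m &&& n) := by
  apply Nat.eq_of_testBit_eq; intro j
  simp only [Nat.testBit_land]
  cases j with
  | zero => simp [Nat.testBit_zero, Nat.mul_mod_right]
  | succ j => simp [Nat.testBit_succ, Nat.mul_add_div]

theorem pvLandSelf (m : Nat) : m &&& m = m := by
  apply Nat.eq_of_testBit_eq; intro j; simp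

theorem pvLand01 (m n : Nat) : (2*m) &&& (2*n+1) = 2*(m &&& n) := by
  rw [Nat.land_comm, pvLand10, Nat.land_comm]

theorem pvXor00 (m n : Nat) : (2*m) ^^^ (2*n) = 2*(m ^^^ n) := by
  apply Nat.eq_of_testBit_eq; intro j
  simp only [Nat.testBit_xor]
  cases j with
  | zero => simp [Nat.testBit_zero, Nat.mul_mod_right]
  | succ j => simp [Nat.testBit_succ]

theorem pvXor11 (m n : Nat) : (2*m+1) ^^^ (2*n+1) = 2*(m ^^^ n) := by
  apply Nat.eq_of_testBit_eq; intro j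
  simp only [Nat.testBit_xor]
  cases j with
  | zero => simp [Nat.testBit_zero]
  | succ j => simp [Nat.testBit_succ, Nat.mul_add_div]

-- Kernighan's step: if the lowest set bit of n is at position i,
-- then n &&& (n-1) clears exactly that bit.
theorem pvKern (i : Nat) : ∀ n : Nat, n ≠ 0 → 2^i ∣ n → n.testBit i = true →
    n &&& (n - 1) = n ^^^ (1 <<< i) ∧ n &&& (n - 1) = n - 2^i := by
  induction i with
  | zero =>
    intro n _ _ hbit
    have hodd : n % 2 = 1 := by
      have := Nat.testBit_zero n ▸ hbit; simpa using this
    obtain ⟨m, hm⟩ : ∃ m, n = 2 * m + 1 := ⟨n / 2, by omega⟩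
    subst hm
    have h1 : 2 * m + 1 - 1 = 2 * m := by omega
    constructor
    · rw [h1, pvLand10, pvLandSelf]
      have : (1:Nat) <<< 0 = 2*0+1 := by simp
      rw [this, pvXor11]; simp
    · rw [h1, pvLand10, pvLandSelf]; simp
  | succ i ih =>
    intro n hne hdvd hbit
    have h2 : (2:Nat) ∣ n := dvd_trans (by exact Dvd.intro_left _ rfl) hdvd
    obtain ⟨m, hm⟩ : ∃ m, n = 2 * m := ⟨n / 2, by omega⟩
    subst hm
    have hmne : m ≠ 0 := by omega
    have hdvd' : 2^i ∣ m := by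
      obtain ⟨q, hq⟩ := hdvd
      refine ⟨q, ?_⟩
      have heq : 2 * m = 2 * (2^i * q) := by rw [hq, pow_succ]; ring
      omega
    have hbit' : m.testBit i = true := by
      have := Nat.testBit_succ (2*m) i
      rw [Nat.mul_div_cancel_left m (by omega : 0 < 2)] at this
      rw [← this]; exact hbit
    obtain ⟨ihx, ihs⟩ := ih m hmne hdvd' hbit'
    have hsub : 2 * m - 1 = 2 * (m - 1) + 1 := by omega
    have hland : (2*m) &&& (2*m - 1) = 2 * (m &&& (m - 1)) := by
      rw [hsub, pvLand01]
    constructor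
    · have hsh : (1:Nat) <<< (i+1) = 2 * (1 <<< i) := by
        simp [Nat.one_shiftLeft, pow_succ]; ring
      rw [hland, hsh, pvXor00, ihx]
    · have h2i : 2^i ≤ m := Nat.le_of_dvd (by omega) hdvd'
      rw [hland, ihs, pow_succ]; omega

-- if bit i is clear and all lower bits are clear, all bits up to i are clear
theorem pvSkip (i n : Nat) (hdvd : 2^i ∣ n) (hbit : n.testBit i = false) :
    2^(i+1) ∣ n := by
  obtain ⟨q, hq⟩ := hdvd
  have hdiv : n / 2^i = q := by
    rw [hq, Nat.mul_div_cancel_left _ (Nat.two_pow_pos i)]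
  have h3 : n.testBit i = decide (n / 2^i % 2 = 1) := Nat.testBit_eq_decide_div_mod_eq
  rw [hbit, hdiv] at h3
  have hq2 : q % 2 = 0 := by
    have : ¬ (q % 2 = 1) := by simpa using h3.symm
    omega
  have hqq : q = 2 * (q / 2) := by omega
  refine ⟨q / 2, ?_⟩
  calc n = 2^i * q := hq
    _ = 2^i * (2 * (q / 2)) := by rw [← hqq]
    _ = 2^(i+1) * (q / 2) := by rw [pow_succ]; ring

-- Kernighan's step removes exactly one set bit from the count
theorem pvPc_land_pred : ∀ n : Nat, n ≠ 0 → pvPc (n &&& (n - 1)) + 1 = pvPc n := by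
  intro n
  induction n using Nat.strong_induction_on with
  | _ n ih =>
    intro hne
    rcases Nat.even_or_odd n with he | ho
    · obtain ⟨m, hm⟩ := he
      have hm' : n = 2 * m := by omega
      subst hm'
      have hmne : m ≠ 0 := by omega
      have hsub : 2 * m - 1 = 2 * (m - 1) + 1 := by omega
      rw [hsub, pvLand01, pvPc_two_mul, pvPc_two_mul, ih m (by omega) hmne]
    · obtain ⟨m, hm⟩ := ho
      subst hm
      have h1 : 2 * m + 1 - 1 = 2 * m := by omega
      rw [h1, pvLand10, pvLandSelf, pvPc_two_mul, pvPc_two_mul_add_one]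

-- cast bridges
theorem pvShiftl1 (i : Nat) : (1:Int) <<< i = ((2^i : Nat) : Int) := by
  rw [← Nat.one_shiftLeft]
  simp

theorem pvShiftrCast (n : Nat) (i : Nat) : ((n : Int) >>> i) = ((n >>> i : Nat) : Int) := by
  simp

theorem pvBandPow (n i : Nat) : PySem.Int.band (n : Int) ((1:Int) <<< i) = ((n &&& 2^i : Nat) : Int) := by
  rw [pvShiftl1, PySem.Int.band_natCast]

theorem pvBxorPow (n i : Nat) : PySem.Int.bxor (n : Int) ((1:Int) <<< i) = ((n ^^^ 2^i : Nat) : Int) := by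
  rw [pvShiftl1]
  have := PySem.Int.bxor_natCast n (2^i)
  simpa [Nat.one_shiftLeft] using this

theorem pvBorPow (n i : Nat) : PySem.Int.bor (n : Int) ((1:Int) <<< i) = ((n ||| 2^i : Nat) : Int) := by
  rw [pvShiftl1, PySem.Int.bor_natCast]

theorem pvShiftBand (n i : Nat) : PySem.Int.band ((n : Int) >>> i) 1 = ((n / 2^i % 2 : Nat) : Int) := by
  rw [pvShiftrCast]
  have := PySem.Int.band_natCast (n >>> i) 1
  simpa [Nat.and_one_is_mod, Nat.shiftRight_eq_div_pow] using this

-- A's countBits computes pvPc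
theorem pvCountBitsA_eq : ∀ (f : Nat) (n c : Nat), n < 2^f →
    pvCountBitsA f (n : Int) (c : Int) = ((c + pvPc n : Nat) : Int) := by
  intro f
  induction f with
  | zero => intro n c h; interval_cases n; simp [pvCountBitsA, pvPc_zero]
  | succ f ih =>
    intro n c h
    rcases Nat.eq_zero_or_pos n with h0 | h0
    · subst h0; simp [pvCountBitsA, pvPc_zero]
    · rw [pvCountBitsA]
      have hne : (n : Int) ≠ 0 := by exact_mod_cast (by omega : n ≠ 0)
      have hsh : ((n : Int) >>> (1:Nat)) = ((n / 2 : Nat) : Int) := by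
        rw [pvShiftrCast]; norm_num [Nat.shiftRight_one]
      have hb : PySem.Int.band (n : Int) 1 = ((n % 2 : Nat) : Int) := by
        have := PySem.Int.band_natCast n 1
        simpa [Nat.and_one_is_mod] using this
      have hc : (c : Int) + ((n % 2 : Nat) : Int) = ((c + n % 2 : Nat) : Int) := by push_cast; ring
      rw [if_pos hne, hsh, hb, hc, ih (n / 2) (c + n % 2) (by
        have : 2^(f+1) = 2 * 2^f := by rw [pow_succ]; ring
        omega)]
      rw [pvPc_rec n (by omega)]
      push_cast; ring

-- A's first loop: clears the (pvPc n - c2) lowest set bits, i.e. pvStripN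
theorem pvLoop1A_eq : ∀ (f i n c2 : Nat), 2^i ∣ n → c2 ≤ pvPc n → Nat.size n + 1 ≤ f + i →
    ∃ i', pvLoop1A f ((pvPc n : Nat) : Int) ((c2 : Nat) : Int) i (n : Int)
      = (((c2 : Nat) : Int), i', ((pvStripN (pvPc n - c2) n : Nat) : Int)) := by
  intro f
  induction f with
  | zero =>
    intro i n c2 hdvd hc2 hsz
    have heq : pvPc n = c2 := by
      by_contra hne
      have hgt : c2 < pvPc n := by omega
      have hne0 : n ≠ 0 := by
        intro h0; subst h0; rw [pvPc_zero] at hgt; omega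
      have h2i : 2^i ≤ n := Nat.le_of_dvd (by omega) hdvd
      have : i < Nat.size n := Nat.lt_size.mpr h2i
      omega
    rw [heq]
    exact ⟨i, by simp [pvLoop1A, pvStripN]⟩
  | succ f ih =>
    intro i n c2 hdvd hc2 hsz
    rcases Nat.lt_or_ge c2 (pvPc n) with hgt | hle
    · have hne0 : n ≠ 0 := by
        intro h0; subst h0; rw [pvPc_zero] at hgt; omega
      have hcond : ((c2 : Nat) : Int) < ((pvPc n : Nat) : Int) := by exact_mod_cast hgt
      rw [pvLoop1A, if_pos (by exact_mod_cast hcond)]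
      by_cases hbit : n.testBit i = true
      · obtain ⟨hker, hsub⟩ := pvKern i n hne0 hdvd hbit
        have hbz : PySem.Int.band (n : Int) ((1:Int) <<< i) ≠ 0 := by
          rw [pvBandPow]
          have : n &&& 2^i = 2^i := by
            rw [Nat.and_two_pow, hbit]; simp
          rw [this]
          positivity
        rw [if_pos hbz]
        have hx : PySem.Int.bxor (n : Int) ((1:Int) <<< i) = ((n &&& (n - 1) : Nat) : Int) := by
          rw [pvBxorPow, ← Nat.one_shiftLeft, ← hker]
        have hpc := pvPc_land_pred n hne0
        have hcnt : ((pvPc n : Nat) : Int) - 1 = ((pvPc (n &&& (n - 1)) : Nat) : Int) := by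
          omega
        have hdvd' : 2^(i+1) ∣ (n &&& (n - 1)) := by
          rw [hsub]
          obtain ⟨q, hq⟩ := hdvd
          have hdiv : n / 2^i = q := by
            rw [hq, Nat.mul_div_cancel_left _ (Nat.two_pow_pos i)]
          have hq1 : q % 2 = 1 := by
            have h3 : n.testBit i = decide (n / 2^i % 2 = 1) := Nat.testBit_eq_decide_div_mod_eq
            rw [hbit, hdiv] at h3
            simpa using h3.symm
          refine ⟨(q - 1) / 2, ?_⟩
          rw [pow_succ, hq]
          have h2i : (0:Nat) < 2^i := Nat.two_pow_pos i
          have : q - 1 = 2 * ((q - 1) / 2) := by omega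
          calc 2^i * q - 2^i = 2^i * (q - 1) := by
                have : 1 ≤ q := by omega
                rw [Nat.mul_sub]; omega
            _ = 2^i * (2 * ((q - 1) / 2)) := by rw [← this]
            _ = 2^i * 2 * ((q - 1) / 2) := by ring
        have hle' : n &&& (n - 1) ≤ n := by rw [hsub]; omega
        have hsz' : Nat.size (n &&& (n - 1)) + 1 ≤ f + (i + 1) := by
          have := Nat.size_le_size hle'
          omega
        rw [hx, hcnt]
        obtain ⟨i', hi'⟩ := ih (i+1) (n &&& (n - 1)) c2 hdvd' (by omega) hsz'
        refine ⟨i', ?_⟩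
        rw [hi']
        have hstrip : pvStripN (pvPc n - c2) n = pvStripN (pvPc (n &&& (n - 1)) - c2) (n &&& (n - 1)) := by
          have hk : pvPc n - c2 = (pvPc (n &&& (n - 1)) - c2) + 1 := by omega
          rw [hk, pvStripN]
        rw [hstrip]
      · have hbit' : n.testBit i = false := by simpa using hbit
        have hbz : PySem.Int.band (n : Int) ((1:Int) <<< i) = 0 := by
          rw [pvBandPow]
          have : n &&& 2^i = 0 := by rw [Nat.and_two_pow, hbit']; simp
          rw [this]; simp
        rw [if_neg (by simpa using hbz)]
        have hdvd' : 2^(i+1) ∣ n := pvSkip i n hdvd hbit'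
        exact ih (i+1) n c2 hdvd' hc2 (by omega)
    · have heq : pvPc n = c2 := by omega
      rw [heq]
      refine ⟨i, ?_⟩
      rw [pvLoop1A, if_neg (by simp)]
      simp [pvStripN]

-- A's first loop is the identity when count1 ≤ count2
theorem pvLoop1A_le (f : Nat) (c1 c2 : Int) (i : Nat) (x : Int) (h : c1 ≤ c2) :
    pvLoop1A f c1 c2 i x = (c1, i, x) := by
  cases f with
  | zero => rfl
  | succ f => rw [pvLoop1A, if_neg (by omega)]

-- A's second loop is the identity when count2 ≤ count1
theorem pvLoop2A_le (f : Nat) (c1 c2 : Int) (i : Nat) (x : Int) (h : c2 ≤ c1) :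
    pvLoop2A f c1 c2 i x = x := by
  cases f with
  | zero => rfl
  | succ f => rw [pvLoop2A, if_neg (by omega)]

-- B's fill loop is the identity when k = 0
theorem pvFillB_zero (f : Nat) (i : Nat) (x : Int) : pvFillB f 0 i x = x := by
  cases f with
  | zero => rfl
  | succ f => rw [pvFillB, if_neg (by simp)]

-- A's second loop and B's fill loop run in lockstep
theorem pvLoop2_fill : ∀ (f : Nat) (c1 c2 : Int) (i n : Nat), c1 ≤ c2 →
    pvLoop2A f c1 c2 i (n : Int) = pvFillB f (c2 - c1) i (n : Int) := by
  intro f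
  induction f with
  | zero => intro c1 c2 i n _; rfl
  | succ f ih =>
    intro c1 c2 i n hle
    rw [pvLoop2A, pvFillB]
    by_cases hc : c1 < c2
    · rw [if_pos (show c2 > c1 from hc)]
      rw [if_pos (show c2 - c1 ≠ 0 by omega)]
      have htestA : PySem.Int.band (n : Int) ((1:Int) <<< i) = ((n &&& 2^i : Nat) : Int) := pvBandPow n i
      by_cases hbit : n.testBit i = true
      · have hA : PySem.Int.band (n : Int) ((1:Int) <<< i) ≠ 0 := by
          rw [htestA, Nat.and_two_pow, hbit]; simp
        have hB : PySem.Int.band ((n : Int) >>> i) 1 ≠ 0 := by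
          rw [pvShiftBand]
          have h3 : n.testBit i = decide (n / 2^i % 2 = 1) := Nat.testBit_eq_decide_div_mod_eq
          rw [hbit] at h3
          have h1 : n / 2^i % 2 = 1 := by simpa using h3.symm
          rw [h1]; simp
        rw [if_neg hA, if_neg hB]
        exact ih c1 c2 (i+1) n hle
      · have hbit' : n.testBit i = false := by simpa using hbit
        have hA : PySem.Int.band (n : Int) ((1:Int) <<< i) = 0 := by
          rw [htestA, Nat.and_two_pow, hbit']; simp
        have hB : PySem.Int.band ((n : Int) >>> i) 1 = 0 := by
          rw [pvShiftBand]
          have h3 : n.testBit i = decide (n / 2^i % 2 = 1) := Nat.testBit_eq_decide_div_mod_eq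
          rw [hbit'] at h3
          have h0 : n / 2^i % 2 ≠ 1 := by simpa using h3.symm
          have : n / 2^i % 2 = 0 := by omega
          rw [this]; simp
        rw [if_pos hA, if_pos hB, pvBorPow]
        have harg : c2 - 1 - c1 = c2 - c1 - 1 := by ring
        rw [← harg]
        exact ih c1 (c2 - 1) (i+1) (n ||| 2^i) (by omega)
    · rw [if_neg (show ¬ c2 > c1 by omega)]
      rw [if_neg (show ¬ c2 - c1 ≠ 0 by omega)]

theorem pvSize_le_self (n : Nat) : Nat.size n ≤ n + 1 := by
  by_contra h
  have h2 : 2^(n+1) ≤ n := Nat.lt_size.mp (by omega)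
  have := Nat.lt_two_pow_self (n := n+1)
  omega

-- ===== lemmas for B's copy loop =====

-- parity decompositions of |||
theorem pvOr00 (m n : Nat) : (2*m) ||| (2*n) = 2*(m ||| n) := by
  apply Nat.eq_of_testBit_eq; intro j
  simp only [Nat.testBit_or]
  cases j with
  | zero => simp [Nat.testBit_zero, Nat.mul_mod_right]
  | succ j => simp [Nat.testBit_succ]

theorem pvOr01 (m n : Nat) : (2*m) ||| (2*n+1) = 2*(m ||| n) + 1 := by
  apply Nat.eq_of_testBit_eq; intro j
  simp only [Nat.testBit_or]
  cases j with
  | zero => simp [Nat.testBit_zero, Nat.mul_mod_right]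
  | succ j => simp [Nat.testBit_succ, Nat.mul_add_div (by omega : 0 < 2)]

-- a disjoint high bit turns ||| into +
theorem pvOrPowAdd : ∀ (j a : Nat), a < 2^j → 2^j ||| a = 2^j + a := by
  intro j
  induction j with
  | zero =>
    intro a h
    interval_cases a
    decide
  | succ j ih =>
    intro a h
    have h2 : 2^(j+1) = 2 * 2^j := by rw [pow_succ]; ring
    rcases Nat.even_or_odd a with he | ho
    · obtain ⟨q, hq⟩ := he
      have hq' : a = 2 * q := by omega
      rw [hq', h2, pvOr00, ih q (by omega)]
      omega
    · obtain ⟨q, hq⟩ := ho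
      rw [hq, h2, pvOr01, ih q (by omega)]
      omega

-- pvPc across a disjoint high bit
theorem pvPc_pow_add : ∀ (j a : Nat), a < 2^j → pvPc (2^j + a) = pvPc a + 1 := by
  intro j
  induction j with
  | zero =>
    intro a h
    interval_cases a
    simp [pvPc_zero]
    rw [show (1:Nat) = 2*0+1 by rfl, pvPc_two_mul_add_one, pvPc_zero]
  | succ j ih =>
    intro a h
    have h2 : 2^(j+1) = 2 * 2^j := by rw [pow_succ]; ring
    rcases Nat.even_or_odd a with he | ho
    · obtain ⟨q, hq⟩ := he
      have hq' : a = 2 * q := by omega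
      have : 2^(j+1) + a = 2 * (2^j + q) := by omega
      rw [this, pvPc_two_mul, hq', pvPc_two_mul, ih q (by omega)]
    · obtain ⟨q, hq⟩ := ho
      have : 2^(j+1) + a = 2 * (2^j + q) + 1 := by omega
      rw [this, pvPc_two_mul_add_one, hq, pvPc_two_mul_add_one, ih q (by omega)]

-- land across a disjoint high bit
theorem pvLandPow (j a b : Nat) (_ha : a < 2^j) (_hb : b < 2^j) :
    (2^j ||| a) &&& (2^j ||| b) = 2^j ||| (a &&& b) := by
  apply Nat.eq_of_testBit_eq; intro i
  simp only [Nat.testBit_land, Nat.testBit_or, Nat.testBit_two_pow]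
  by_cases hij : j = i
  · simp [hij]
  · rw [decide_eq_false hij]
    simp

theorem pvStrip_zero : ∀ k : Nat, pvStripN k 0 = 0 := by
  intro k
  induction k with
  | zero => rfl
  | succ k ih => rw [pvStripN]; simpa using ih

-- stripping all set bits yields 0
theorem pvStrip_all : ∀ n : Nat, pvStripN (pvPc n) n = 0 := by
  intro n
  induction n using Nat.strong_induction_on with
  | _ n ih =>
    rcases Nat.eq_zero_or_pos n with h | h
    · subst h; rw [pvPc_zero]; rfl
    · have hpc := pvPc_land_pred n (by omega)
      have hlt : n &&& (n - 1) < n := by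
        have := Nat.and_le_right (n := n) (m := n - 1)
        omega
      rw [show pvPc n = (pvPc (n &&& (n-1))) + 1 by omega, pvStripN]
      exact ih _ hlt

-- stripping low set bits never touches a disjoint high bit
theorem pvStrip_high : ∀ (d j low : Nat), low < 2^j → d ≤ pvPc low →
    pvStripN d (2^j ||| low) = 2^j ||| pvStripN d low := by
  intro d
  induction d with
  | zero => intro j low _ _; rfl
  | succ d ih =>
    intro j low hlt hd
    have hne : low ≠ 0 := by
      intro h0; subst h0; rw [pvPc_zero] at hd; omega
    have h1 : (2^j ||| low) - 1 = 2^j ||| (low - 1) := by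
      rw [pvOrPowAdd j low hlt, pvOrPowAdd j (low - 1) (by omega)]
      omega
    rw [pvStripN, h1, pvLandPow j low (low - 1) hlt (by omega)]
    have hpc := pvPc_land_pred low hne
    have hlt' : low &&& (low - 1) < 2^j := by
      have := Nat.and_le_right (n := low) (m := low - 1)
      omega
    rw [ih j (low &&& (low - 1)) hlt' (by omega)]
    rw [pvStripN]

-- B's copy loop keeps exactly the top min(k, popcount) set bits of the low
-- j positions of n, i.e. strips the (popcount - k) lowest ones
theorem pvCopyB_eq : ∀ (j : Nat) (n res : Nat) (k : Int), 0 ≤ k →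
    pvCopyB j k (n : Int) (res : Int) =
      (((res ||| pvStripN (pvPc (n % 2^j) - k.toNat) (n % 2^j) : Nat) : Int),
       k - ((min k.toNat (pvPc (n % 2^j)) : Nat) : Int)) := by
  intro j
  induction j with
  | zero =>
    intro n res k hk
    have h1 : n % 2^0 = 0 := by simp [Nat.mod_one]
    rw [pvCopyB, h1, pvPc_zero]
    simp [pvStrip_zero]
  | succ j ih =>
    intro n res k hk
    have hmod : n % 2^(j+1) = n % 2^j + 2^j * (n / 2^j % 2) := by
      rw [pow_succ]; exact Nat.mod_mul
    have hlow : n % 2^j < 2^j := Nat.mod_lt _ (Nat.two_pow_pos j)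
    rw [pvCopyB, pvShiftBand]
    by_cases hbit : n / 2^j % 2 = 1
    · -- bit j of n is set
      have hm : n % 2^(j+1) = 2^j + n % 2^j := by rw [hmod, hbit]; ring
      have hpcm : pvPc (n % 2^(j+1)) = pvPc (n % 2^j) + 1 := by
        rw [hm, pvPc_pow_add j _ hlow]
      by_cases hk0 : k = 0
      · subst hk0
        rw [if_neg (by simp)]
        rw [ih n res 0 le_rfl]
        have hz : pvStripN (pvPc (n % 2^j) - Int.toNat 0) (n % 2^j) = 0 := by
          simpa using pvStrip_all (n % 2^j)
        have hz' : pvStripN (pvPc (n % 2^(j+1)) - Int.toNat 0) (n % 2^(j+1)) = 0 := by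
          simpa using pvStrip_all (n % 2^(j+1))
        rw [hz, hz']
        simp
      · rw [if_pos ⟨hk0, by rw [hbit]; simp⟩, pvBorPow]
        rw [ih n (res ||| 2^j) (k - 1) (by omega)]
        have hk1 : 1 ≤ k.toNat := by omega
        have hkm : (k - 1).toNat = k.toNat - 1 := by omega
        rw [Prod.mk.injEq]
        refine ⟨?_, ?_⟩
        · -- values
          have hd : pvPc (n % 2^(j+1)) - k.toNat = pvPc (n % 2^j) - (k - 1).toNat := by
            rw [hpcm, hkm]; omega
          have hdle : pvPc (n % 2^j) - (k - 1).toNat ≤ pvPc (n % 2^j) := by omega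
          rw [hd, hm, ← pvOrPowAdd j _ hlow, pvStrip_high _ j _ hlow hdle]
          congr 1
          rw [Nat.or_assoc]
        · -- leftover counter
          rw [hpcm, hkm]
          omega
    · -- bit j of n is clear: same state, same low part
      have hb0 : n / 2^j % 2 = 0 := by omega
      have hm : n % 2^(j+1) = n % 2^j := by rw [hmod, hb0]; ring
      rw [if_neg (by rw [hb0]; simp), ih n res k hk, hm]

-- ===== VERDICT (by name: the statement is the Claim_ definition above) =====
theorem minimizeXor_spec : Claim_equal_minimizeXor := by
  intro num1 num2 hdom hpre
  obtain ⟨h1, h2⟩ := hpre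
  unfold Dom_minimizeXor pvDomInt at hdom
  simp only [Bool.and_eq_true, decide_eq_true_eq] at hdom
  obtain ⟨⟨_, hub1⟩, ⟨_, hub2⟩⟩ := hdom
  set n := num1.toNat with hn
  set m := num2.toNat with hm
  have hn1 : num1 = (n : Int) := (Int.toNat_of_nonneg h1).symm
  have hm1 : num2 = (m : Int) := (Int.toNat_of_nonneg h2).symm
  set fuel := n + m + 200 with hfuel
  have hnfuel : n < 2^fuel := by
    have h1 : n ≤ fuel := by omega
    have h2 : fuel < 2^fuel := Nat.lt_two_pow_self
    omega
  have hmfuel : m < 2^fuel := by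
    have h1 : m ≤ fuel := by omega
    have h2 : fuel < 2^fuel := Nat.lt_two_pow_self
    omega
  unfold Spec_minimizeXor minimizeXor minimizeXor_alt
  have eA1 := pvCountBitsA_eq fuel n 0 hnfuel
  have eA2 := pvCountBitsA_eq fuel m 0 hmfuel
  push_cast at eA1 eA2
  simp only [hn1, hm1, Int.natAbs_natCast, ← hfuel]
  rw [eA1, eA2]
  simp only [zero_add]
  -- evaluate B's copy loop over all bit positions of n
  have hsize : n % 2^(Nat.size n) = n := Nat.mod_eq_of_lt (Nat.lt_size_self n)
  have hcopy := pvCopyB_eq (Nat.size n) n 0 ((pvPc m : Nat) : Int) (Int.natCast_nonneg _)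
  rw [hsize] at hcopy
  have htn : ((pvPc m : Nat) : Int).toNat = pvPc m := by omega
  rw [htn] at hcopy
  rw [show ((0:Nat) : Int) = (0 : Int) by simp] at hcopy
  rw [hcopy]
  simp only [Nat.zero_or]
  rcases Nat.lt_or_ge (pvPc n) (pvPc m) with hlt | hge
  · -- fill case: A's loop1 is the identity, loop2 fills; B copies all of n
    rw [pvLoop1A_le fuel _ _ 0 _ (by exact_mod_cast Nat.le_of_lt hlt)]
    dsimp only
    have hstrip0 : pvPc n - pvPc m = 0 := by omega
    have hmin : min (pvPc m) (pvPc n) = pvPc n := by omega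
    rw [hstrip0, hmin]
    rw [show pvStripN 0 n = n from rfl]
    rw [pvLoop2_fill fuel _ _ 0 n (by exact_mod_cast Nat.le_of_lt hlt)]
  · -- strip case: A's loop1 strips, loop2 is the identity; B's fill is the identity
    have hsz : Nat.size n + 1 ≤ fuel + 0 := by
      have := pvSize_le_self n; omega
    obtain ⟨i', hi'⟩ := pvLoop1A_eq fuel 0 n (pvPc m) (by simp) hge hsz
    rw [hi']
    dsimp only
    rw [pvLoop2A_le fuel _ _ i' _ (le_refl _)]
    have hmin : min (pvPc m) (pvPc n) = pvPc m := by omega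
    rw [hmin]
    rw [show ((pvPc m : Nat) : Int) - ((pvPc m : Nat) : Int) = 0 by ring]
    rw [pvFillB_zero]
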